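-- pv_equiv track=rewrite | github.com/catoteig/julekalender2022 | knowitjulekalender/door_11/door_11.py | validate_parity
-- ===== SOURCE A (Python) =====
-- def validate_parity(matrix, parity):
--     total = skip = take = 0
--
--     for value in matrix:
--         if skip == 0 and take == 0:
--             skip = take = parity
--
--         if skip > 0:
--             skip -= 1
--         elif take > 0:
--             total += value
--             take -= 1
--
--     return total % 2 == 0
-- ===== SOURCE B (Python) =====
-- def validate_parity(matrix, parity):
--     if parity <= 0:
--         return True
--     cyc = 2 * parity
--     total = sum(v for i, v in enumerate(matrix) if i % cyc >= parity)
--     return total % 2 == 0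
-- ===== Notes on version B (the rewrite author's own statement) =====
-- stated objective: simpler
-- what changed: Replaces the skip/take countdown state machine with a single index-modulo test (element i is taken iff i % (2*parity) >= parity), summing via enumerate; for parity <= 0 the loop takes nothing so it returns True directly.
import Mathlib
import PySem

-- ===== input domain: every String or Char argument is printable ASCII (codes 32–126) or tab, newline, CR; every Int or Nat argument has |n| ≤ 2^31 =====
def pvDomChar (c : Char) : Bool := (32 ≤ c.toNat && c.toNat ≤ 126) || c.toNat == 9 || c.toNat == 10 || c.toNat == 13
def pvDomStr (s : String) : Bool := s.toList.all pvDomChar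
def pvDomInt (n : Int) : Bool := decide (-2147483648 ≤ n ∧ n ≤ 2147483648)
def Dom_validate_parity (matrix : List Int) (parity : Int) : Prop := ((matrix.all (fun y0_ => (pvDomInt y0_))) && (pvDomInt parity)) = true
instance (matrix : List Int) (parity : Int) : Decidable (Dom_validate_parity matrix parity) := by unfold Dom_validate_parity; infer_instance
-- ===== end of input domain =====

-- B replaces A's skip/take countdown state machine with an index-modulo test over enumerate (simpler decomposition).

-- ===== PORT A =====
-- one loop iteration over state (total, skip, take); the simultaneous
-- 'skip = take = parity' reset is written componentwise
def vpStep (parity : Int) (s : Int × Int × Int) (value : Int) : Int × Int × Int :=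
  let total := s.1
  let skip := if s.2.1 = 0 ∧ s.2.2 = 0 then parity else s.2.1
  let take := if s.2.1 = 0 ∧ s.2.2 = 0 then parity else s.2.2
  if skip > 0 then (total, skip - 1, take)
  else if take > 0 then (total + value, skip, take - 1)
  else (total, skip, take)

def validate_parity (matrix : List Int) (parity : Int) : Bool :=
  PySem.Int.mod (matrix.foldl (vpStep parity) (0, 0, 0)).1 2 == 0

-- ===== PORT B =====
def validate_parity_alt (matrix : List Int) (parity : Int) : Bool :=
  if parity ≤ 0 then true
  else
    PySem.Int.mod
      ((PySem.List.enumerate matrix).foldl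
        (fun a q => if PySem.Int.mod q.1 (2 * parity) ≥ parity then a + q.2 else a) 0)
      2 == 0

-- ===== PRECONDITION & SPEC =====
def Spec_validate_parity (matrix : List Int) (parity : Int) (out : Bool) : Prop := out = validate_parity_alt matrix parity
instance (matrix : List Int) (parity : Int) (out : Bool) : Decidable (Spec_validate_parity matrix parity out) := by unfold Spec_validate_parity; infer_instance

-- ===== CLAIM (what is proved, stated in full; the proofs are below) =====
def Claim_equal_validate_parity : Prop := ∀ (matrix : List Int) (parity : Int), Dom_validate_parity matrix parity → Spec_validate_parity matrix parity (validate_parity matrix parity)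

-- ===== LEMMAS AND PROOFS =====

-- skip/take value of A's state just before processing the element at position i, as a
-- function of r = i % (2*parity), for parity > 0
def skipOf (p r : Int) : Int := if r = 0 then 0 else if r ≤ p then p - r else 0
def takeOf (p r : Int) : Int := if r = 0 then 0 else if r ≤ p then p else 2 * p - r

-- degenerate case: parity ≤ 0 never takes anything, total stays put
lemma vp_nonpos (p : Int) (hp : p ≤ 0) :
    ∀ (l : List Int) (t s k : Int), s ≤ 0 → k ≤ 0 →
      (l.foldl (vpStep p) (t, s, k)).1 = t := by
  intro l
  induction l with
  | nil => intro t s k _ _; rfl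
  | cons v l ih =>
    intro t s k hs hk
    simp only [List.foldl_cons, vpStep]
    by_cases h0 : s = 0 ∧ k = 0
    · rw [if_pos h0, if_pos h0]
      split_ifs with h1
      · omega
      · exact ih t p p hp hp
    · rw [if_neg h0, if_neg h0]
      split_ifs with h1 h2
      · omega
      · omega
      · exact ih t s k hs hk

lemma mod_succ (p i : Int) (hp : 0 < p) :
    PySem.Int.mod (i + 1) (2 * p) =
      (if PySem.Int.mod i (2 * p) = 2 * p - 1 then 0 else PySem.Int.mod i (2 * p) + 1) := by
  rw [PySem.Int.mod_eq_emod_of_pos (by omega : (0:Int) < 2 * p),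
      PySem.Int.mod_eq_emod_of_pos (by omega : (0:Int) < 2 * p)]
  have hlt := Int.emod_lt_of_pos i (b := 2 * p) (by omega)
  have hge := Int.emod_nonneg i (show (2:Int) * p ≠ 0 by omega)
  have h1b : (1 : Int) % (2 * p) = 1 := Int.emod_eq_of_lt (by omega) (by omega)
  have h1 : (i + 1) % (2 * p) = (i % (2 * p) + 1) % (2 * p) := by
    rw [Int.add_emod, h1b]
  rw [h1]
  split_ifs with h
  · rw [h]; simp
  · exact Int.emod_eq_of_lt (by omega) (by omega)

-- main invariant: starting A's loop in the state determined by r = i % (2p), the final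
-- total is B's enumerate-fold starting at index i
lemma vp_pos (p : Int) (hp : 0 < p) :
    ∀ (l : List Int) (i t : Int),
      (l.foldl (vpStep p)
          (t, skipOf p (PySem.Int.mod i (2 * p)), takeOf p (PySem.Int.mod i (2 * p)))).1
      = (PySem.List.enumerate l i).foldl
          (fun a q => if PySem.Int.mod q.1 (2 * p) ≥ p then a + q.2 else a) t := by
  intro l
  induction l with
  | nil => intro i t; simp [PySem.List.enumerate]
  | cons v l ih =>
    intro i t
    have hlt : PySem.Int.mod i (2 * p) < 2 * p := by
      rw [PySem.Int.mod_eq_emod_of_pos (by omega : (0:Int) < 2 * p)]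
      exact Int.emod_lt_of_pos i (by omega)
    have hge : 0 ≤ PySem.Int.mod i (2 * p) := by
      rw [PySem.Int.mod_eq_emod_of_pos (by omega : (0:Int) < 2 * p)]
      exact Int.emod_nonneg i (by omega)
    set r := PySem.Int.mod i (2 * p) with hr
    have hsucc := mod_succ p i hp
    rw [← hr] at hsucc
    rw [PySem.List.enumerate_cons]
    simp only [List.foldl_cons, ← hr]
    have hstep : vpStep p (t, skipOf p r, takeOf p r) v
        = ((if r ≥ p then t + v else t),
            skipOf p (PySem.Int.mod (i + 1) (2 * p)),
            takeOf p (PySem.Int.mod (i + 1) (2 * p))) := by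
      by_cases h2 : r = 2 * p - 1
      · have hs : PySem.Int.mod (i + 1) (2 * p) = 0 := by rw [hsucc, if_pos h2]
        rw [hs]
        simp only [vpStep, skipOf, takeOf]
        split_ifs <;> simp only [Prod.mk.injEq, true_and, and_true] <;> omega
      · have hs : PySem.Int.mod (i + 1) (2 * p) = r + 1 := by rw [hsucc, if_neg h2]
        rw [hs]
        simp only [vpStep, skipOf, takeOf]
        split_ifs <;> simp only [Prod.mk.injEq, true_and, and_true] <;> omega
    rw [hstep]
    exact ih (i + 1) _

-- ===== VERDICT (by name: the statement is the Claim_ definition above) =====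
theorem validate_parity_spec : Claim_equal_validate_parity := by
  intro matrix parity _
  unfold Spec_validate_parity validate_parity validate_parity_alt
  by_cases hp : parity ≤ 0
  · rw [if_pos hp, vp_nonpos parity hp matrix 0 0 0 le_rfl le_rfl]
    decide
  · rw [if_neg hp]
    have h0 : PySem.Int.mod 0 (2 * parity) = 0 := by
      rw [PySem.Int.mod_eq_emod_of_pos (by omega : (0:Int) < 2 * parity)]; simp
    have h := vp_pos parity (by omega) matrix 0 0
    rw [h0] at h
    norm_num [skipOf, takeOf] at h
    rw [h]
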